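-- pv_equiv track=rewrite | github.com/washwin/Artificial-Intelligence-lab | lab 2_block world domain/18.py | heuristic2
-- ===== SOURCE A (Python) =====
-- goalState = [['C','GROUND'], ['A', 'GROUND'], ['B','D','GROUND']]
--
-- def heuristic2(currentState):
--     value = 0
--     for i in range(3):
--         for j in range(len(currentState[i])-1):
--             if currentState[i][j:]==goalState[0][j:] or currentState[i][j:]==goalState[1][j:] or currentState[i][j:]==goalState[2][j:]:
--                 value = value + len(currentState[i]) - j - 2
--             else:
--                 value = value - len(currentState[i]) + j + 2
--     return value
-- ===== SOURCE B (Python) =====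
-- goalState = [['C','GROUND'], ['A', 'GROUND'], ['B','D','GROUND']]
--
-- def heuristic2(currentState):
--     # One backward pass per stack: maintain for each goal stack whether the
--     # suffix starting at j matches, instead of re-slicing for every j.
--     total = 0
--     for i in range(3):
--         row = currentState[i]
--         L = len(row)
--         eqs = [len(g) <= L for g in goalState]
--         acc = 0
--         for j in range(L - 1, -1, -1):
--             eqs = [e and j < len(g) and row[j] == g[j]
--                    for e, g in zip(eqs, goalState)]
--             if j <= L - 2:
--                 acc += (L - j - 2) if any(eqs) else -(L - j - 2)
--         total += acc
--     return total
-- ===== Notes on version B (the rewrite author's own statement) =====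
-- stated objective: alternative
-- what changed: Instead of re-slicing each stack for every start index and comparing whole suffixes (quadratic per stack), B does one backward pass per stack, maintaining the three suffix-match booleans incrementally and accumulating the +/- contributions.
-- outside the precondition, e.g. on heuristic2([['A', 'GROUND'], ['B', 'GROUND']]): A raises IndexError, B raises IndexError
import Mathlib
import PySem

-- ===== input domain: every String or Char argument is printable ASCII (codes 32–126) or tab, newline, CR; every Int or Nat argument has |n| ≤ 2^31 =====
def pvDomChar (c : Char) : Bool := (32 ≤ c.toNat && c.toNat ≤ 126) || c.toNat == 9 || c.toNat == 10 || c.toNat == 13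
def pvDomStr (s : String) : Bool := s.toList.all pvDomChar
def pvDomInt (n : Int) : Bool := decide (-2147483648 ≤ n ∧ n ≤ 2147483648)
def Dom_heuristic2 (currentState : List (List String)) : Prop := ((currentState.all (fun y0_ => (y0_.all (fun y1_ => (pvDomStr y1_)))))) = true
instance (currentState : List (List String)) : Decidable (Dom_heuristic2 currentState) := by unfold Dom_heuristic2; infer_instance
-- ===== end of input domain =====

-- B replaces A's per-stack re-slicing by one backward pass per stack that
-- maintains the suffix-match booleans incrementally (objective: alternative).

def goalState : List (List String) := [["C", "GROUND"], ["A", "GROUND"], ["B", "D", "GROUND"]]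

-- ===== PORT A =====
def heuristic2 (currentState : List (List String)) : Int :=
  (PySem.List.pyRange 0 3 1).foldl (fun value i =>
    (PySem.List.pyRange 0 ((((PySem.List.pyGet? currentState i).getD []).length : Int) - 1) 1).foldl
      (fun value j =>
        if PySem.List.slice ((PySem.List.pyGet? currentState i).getD []) (some j) none
             = PySem.List.slice ((PySem.List.pyGet? goalState 0).getD []) (some j) none
           ∨ PySem.List.slice ((PySem.List.pyGet? currentState i).getD []) (some j) none
             = PySem.List.slice ((PySem.List.pyGet? goalState 1).getD []) (some j) none
           ∨ PySem.List.slice ((PySem.List.pyGet? currentState i).getD []) (some j) none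
             = PySem.List.slice ((PySem.List.pyGet? goalState 2).getD []) (some j) none
        then value + (((PySem.List.pyGet? currentState i).getD []).length : Int) - j - 2
        else value - (((PySem.List.pyGet? currentState i).getD []).length : Int) + j + 2)
      value) 0

-- ===== PORT B =====
-- the list comprehension updating the three suffix-match booleans, and the
-- accumulator update, of Source B's inner backward loop
def altStep (row : List String) (st : List Bool × Int) (j : Int) : List Bool × Int :=
  let eqs := (st.1.zip goalState).map (fun eg =>
    eg.1 && decide (j < (eg.2.length : Int)) && (PySem.List.pyGet? row j == PySem.List.pyGet? eg.2 j))
  let acc := if j ≤ (row.length : Int) - 2 then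
      (if eqs.any id then st.2 + ((row.length : Int) - j - 2) else st.2 - ((row.length : Int) - j - 2))
    else st.2
  (eqs, acc)

def heuristic2_alt (currentState : List (List String)) : Int :=
  (PySem.List.pyRange 0 3 1).foldl (fun total i =>
    let row := (PySem.List.pyGet? currentState i).getD []
    let eqs := goalState.map (fun g => decide ((g.length : Int) ≤ (row.length : Int)))
    let p := (PySem.List.pyRange ((row.length : Int) - 1) (-1) (-1)).foldl (altStep row) (eqs, 0)
    total + p.2) 0

-- ===== PRECONDITION & SPEC =====
-- Pre_ excludes states with fewer than 3 stacks, on which Python A raises IndexError.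
def Pre_heuristic2 (currentState : List (List String)) : Prop := 3 ≤ currentState.length
instance (currentState : List (List String)) : Decidable (Pre_heuristic2 currentState) := by unfold Pre_heuristic2; infer_instance
def pvWitness_heuristic2 : List (List String) := [["A", "GROUND"], ["C", "GROUND"], ["B", "D", "GROUND"]]

def Spec_heuristic2 (currentState : List (List String)) (out : Int) : Prop := out = heuristic2_alt currentState
instance (currentState : List (List String)) (out : Int) : Decidable (Spec_heuristic2 currentState out) := by unfold Spec_heuristic2; infer_instance

-- ===== CLAIM (what is proved, stated in full; the proofs are below) =====
def Claim_equal_heuristic2 : Prop := ∀ (currentState : List (List String)), Dom_heuristic2 currentState → Pre_heuristic2 currentState → Spec_heuristic2 currentState (heuristic2 currentState)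

-- ===== LEMMAS AND PROOFS =====

-- the per-position contribution both programs sum: +/- (len - j - 2) according
-- to whether the suffix of the row starting at j equals a goal suffix
def fterm (row : List String) (j : Int) : Int :=
  if row.drop j.toNat = (["C", "GROUND"] : List String).drop j.toNat
     ∨ row.drop j.toNat = (["A", "GROUND"] : List String).drop j.toNat
     ∨ row.drop j.toNat = (["B", "D", "GROUND"] : List String).drop j.toNat
  then ((row.length : Int) - j - 2) else -((row.length : Int) - j - 2)

-- the suffix-match booleans of B's loop state after position k
def Eb (row : List String) (k : Nat) : List Bool :=
  goalState.map (fun g => decide (row.drop k = g.drop k))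

lemma innerA_eq_sum (row : List String) (V : Int) :
    (PySem.List.pyRange 0 ((row.length : Int) - 1) 1).foldl
      (fun value j =>
        if PySem.List.slice row (some j) none = PySem.List.slice ((PySem.List.pyGet? goalState 0).getD []) (some j) none
           ∨ PySem.List.slice row (some j) none = PySem.List.slice ((PySem.List.pyGet? goalState 1).getD []) (some j) none
           ∨ PySem.List.slice row (some j) none = PySem.List.slice ((PySem.List.pyGet? goalState 2).getD []) (some j) none
        then value + (row.length : Int) - j - 2
        else value - (row.length : Int) + j + 2) V
    = V + ((PySem.List.pyRange 0 ((row.length : Int) - 1) 1).map (fterm row)).sum := by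
  rw [← PySem.List.foldl_add (PySem.List.pyRange 0 ((row.length : Int) - 1) 1) (fterm row) V]
  apply PySem.List.foldl_congr_mem
  intro acc j hj
  have h0 : (0:Int) ≤ j := (PySem.List.mem_pyRange_one.mp hj).1
  have e0 : (PySem.List.pyGet? goalState 0).getD [] = ["C", "GROUND"] := by rfl
  have e1 : (PySem.List.pyGet? goalState 1).getD [] = ["A", "GROUND"] := by rfl
  have e2 : (PySem.List.pyGet? goalState 2).getD [] = ["B", "D", "GROUND"] := by rfl
  simp only [e0, e1, e2, PySem.List.slice_from, h0, fterm]
  split_ifs with h <;> ring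

lemma eq_step (row g : List String) (k : Nat) (hk : k < row.length) :
    (decide (row.drop (k+1) = g.drop (k+1)) && decide ((k : Int) < (g.length : Int))
      && (PySem.List.pyGet? row (k : Int) == PySem.List.pyGet? g (k : Int)))
    = decide (row.drop k = g.drop k) := by
  by_cases hg : k < g.length
  · rw [Bool.eq_iff_iff]
    simp only [Bool.and_eq_true, decide_eq_true_eq, PySem.List.pyGet?_natCast,
      List.getElem?_eq_getElem hk, List.getElem?_eq_getElem hg, beq_iff_eq, Option.some.injEq]
    rw [List.drop_eq_getElem_cons hk, List.drop_eq_getElem_cons hg, List.cons_eq_cons]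
    constructor
    · rintro ⟨⟨h1, _⟩, h2⟩; exact ⟨h2, h1⟩
    · rintro ⟨h2, h1⟩; exact ⟨⟨h1, by exact_mod_cast hg⟩, h2⟩
  · have h1 : ¬ ((k : Int) < (g.length : Int)) := by exact_mod_cast hg
    have h2 : row.drop k ≠ [] := by simp [List.drop_eq_nil_iff]; omega
    simp [h1, h2, List.drop_eq_nil_of_le (Nat.le_of_not_lt hg)]

lemma Eb_init (row : List String) :
    goalState.map (fun g => decide ((g.length : Int) ≤ (row.length : Int))) = Eb row row.length := by
  simp only [Eb, goalState, List.map]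
  norm_num [List.drop_length, eq_comm (a := ([] : List String)), List.drop_eq_nil_iff]

lemma altStep_eq (row : List String) (k : Nat) (hk : k < row.length) (acc0 : Int) :
    altStep row (Eb row (k+1), acc0) (k : Int)
    = (Eb row k, acc0 + (if (k : Int) ≤ (row.length : Int) - 2 then fterm row (k : Int) else 0)) := by
  have hz : ((k : Int)).toNat = k := by omega
  simp only [altStep, Eb, goalState, List.map, List.zip, List.zipWith]
  rw [eq_step row _ k hk, eq_step row _ k hk, eq_step row _ k hk]
  simp only [fterm, hz, List.any, id, Prod.mk.injEq]
  refine ⟨trivial, ?_⟩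
  split_ifs with h1 h2 h3 h4
  · ring
  · simp only [Bool.or_eq_true, decide_eq_true_eq, Bool.false_eq_true, or_false] at h2 h3
    exact absurd h2 h3
  · simp only [Bool.or_eq_true, decide_eq_true_eq, Bool.false_eq_true, or_false] at h2 h4
    exact absurd h4 h2
  · ring
  · ring

lemma Bloop (row : List String) (k : Nat) (hk : k ≤ row.length) (acc0 : Int) :
    (PySem.List.pyRange ((k : Int) - 1) (-1) (-1)).foldl (altStep row) (Eb row k, acc0)
    = (Eb row 0,
       acc0 + ((PySem.List.pyRange 0 (min (k : Int) ((row.length : Int) - 1)) 1).map (fterm row)).sum) := by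
  induction k generalizing acc0 with
  | zero =>
    rw [PySem.List.pyRange_neg_one_eq_nil (by omega), PySem.List.pyRange_one_eq_nil (by simp)]
    simp
  | succ k ih =>
    have hk' : k < row.length := hk
    rw [show ((k+1 : Nat) : Int) - 1 = (k : Int) by push_cast; ring,
        PySem.List.pyRange_neg_one_cons (by omega), List.foldl_cons,
        show (k : Int) - 1 = ((k : Nat) : Int) - 1 by norm_num,
        altStep_eq row k hk' acc0, ih (Nat.le_of_lt hk')]
    congr 1
    by_cases hle : (k : Int) ≤ (row.length : Int) - 2
    · rw [show min ((k+1 : Nat) : Int) ((row.length : Int) - 1) = (k : Int) + 1 by push_cast; omega,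
          show min ((k : Nat) : Int) ((row.length : Int) - 1) = (k : Int) by omega,
          PySem.List.pyRange_one_succ_right (by omega)]
      simp only [List.map_append, List.sum_append, List.map_cons, List.map_nil, List.sum_cons,
        List.sum_nil, if_pos hle]
      ring
    · have hkl : (k : Int) = (row.length : Int) - 1 := by omega
      rw [show min ((k+1 : Nat) : Int) ((row.length : Int) - 1) = min ((k : Nat) : Int) ((row.length : Int) - 1) by push_cast; omega]
      simp [if_neg hle]

lemma innerB_eq_sum (row : List String) :
    ((PySem.List.pyRange ((row.length : Int) - 1) (-1) (-1)).foldl (altStep row)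
      (goalState.map (fun g => decide ((g.length : Int) ≤ (row.length : Int))), 0)).2
    = ((PySem.List.pyRange 0 ((row.length : Int) - 1) 1).map (fterm row)).sum := by
  rw [Eb_init, Bloop row row.length (le_refl _) 0]
  have : PySem.List.pyRange 0 (min ((row.length : Nat) : Int) ((row.length : Int) - 1)) 1
       = PySem.List.pyRange 0 ((row.length : Int) - 1) 1 := by
    rcases Nat.eq_zero_or_pos row.length with h | h
    · rw [h]; rw [PySem.List.pyRange_one_eq_nil (by simp), PySem.List.pyRange_one_eq_nil (by simp)]
    · congr 1; omega
  rw [this]; simp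

-- ===== VERDICT (by name: the statement is the Claim_ definition above) =====
theorem heuristic2_spec : Claim_equal_heuristic2 := by
  intro cs _ _
  unfold Spec_heuristic2 heuristic2 heuristic2_alt
  have h3 : PySem.List.pyRange 0 3 1 = [0, 1, 2] := by decide
  rw [h3]
  simp only [List.foldl]
  rw [innerA_eq_sum ((PySem.List.pyGet? cs 0).getD []),
      innerA_eq_sum ((PySem.List.pyGet? cs 1).getD []),
      innerA_eq_sum ((PySem.List.pyGet? cs 2).getD []),
      innerB_eq_sum ((PySem.List.pyGet? cs 0).getD []),
      innerB_eq_sum ((PySem.List.pyGet? cs 1).getD []),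
      innerB_eq_sum ((PySem.List.pyGet? cs 2).getD [])]
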